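-- pv_equiv track=rewrite | github.com/S2008syx/Cat | hd_calculator/chart_properties.py | _has_path_to_throat
-- ===== SOURCE A (Python) =====
-- from collections import defaultdict
--
-- def _build_center_adjacency(active_channels: list[dict]) -> dict[str, set[str]]:
--     """Build adjacency graph of defined centers connected by active channels.
--
--     Args:
--         active_channels: List of active channel dicts.
--
--     Returns:
--         Adjacency dict: {center_name: set of connected center names}.
--     """
--     adj: dict[str, set[str]] = defaultdict(set)
--     for ch in active_channels:
--         a, b = ch["center_a"], ch["center_b"]
--         adj[a].add(b)
--         adj[b].add(a)
--     return dict(adj)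
--
-- def _has_path_to_throat(
--     start_center: str,
--     defined_centers: set[str],
--     active_channels: list[dict],
-- ) -> bool:
--     """Check if there's a path from start_center to throat through defined channels.
--
--     Uses BFS to search through defined centers connected by active channels.
--
--     Args:
--         start_center: Starting center name.
--         defined_centers: Set of all defined center names.
--         active_channels: List of active channel dicts.
--
--     Returns:
--         True if a path exists from start_center to "throat".
--     """
--     if start_center == "throat":
--         return True
--     if start_center not in defined_centers:
--         return False
--
--     adj = _build_center_adjacency(active_channels)
--     visited: set[str] = set()
--     queue = [start_center]
--
--     while queue:
--         current = queue.pop(0)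
--         if current == "throat":
--             return True
--         if current in visited:
--             continue
--         visited.add(current)
--         for neighbor in adj.get(current, set()):
--             if neighbor not in visited and neighbor in defined_centers:
--                 queue.append(neighbor)
--
--     return False
-- ===== SOURCE B (Python) =====
-- def _has_path_to_throat(
--     start_center,
--     defined_centers,
--     active_channels,
-- ):
--     """Round-based set saturation over the raw channel list (no adjacency dict,
--     no queue): after len(defined_centers) rounds the reachable set is closed."""
--     if start_center == "throat":
--         return True
--     if start_center not in defined_centers:
--         return False
--
--     reach = {start_center}
--     for _ in range(len(defined_centers)):
--         new = set(reach)
--         for ch in active_channels: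
--             a, b = ch["center_a"], ch["center_b"]
--             if a in reach and b in defined_centers:
--                 new.add(b)
--             if b in reach and a in defined_centers:
--                 new.add(a)
--         reach = new
--     return "throat" in reach
-- ===== Notes on version B (the rewrite author's own statement) =====
-- stated objective: alternative
-- what changed: Replaced the adjacency-dict + queue BFS with a bounded-round set-saturation (Bellman-Ford-style closure) that scans the raw channel list each round; after len(defined_centers) rounds the reachable set is provably closed.
import Mathlib
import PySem

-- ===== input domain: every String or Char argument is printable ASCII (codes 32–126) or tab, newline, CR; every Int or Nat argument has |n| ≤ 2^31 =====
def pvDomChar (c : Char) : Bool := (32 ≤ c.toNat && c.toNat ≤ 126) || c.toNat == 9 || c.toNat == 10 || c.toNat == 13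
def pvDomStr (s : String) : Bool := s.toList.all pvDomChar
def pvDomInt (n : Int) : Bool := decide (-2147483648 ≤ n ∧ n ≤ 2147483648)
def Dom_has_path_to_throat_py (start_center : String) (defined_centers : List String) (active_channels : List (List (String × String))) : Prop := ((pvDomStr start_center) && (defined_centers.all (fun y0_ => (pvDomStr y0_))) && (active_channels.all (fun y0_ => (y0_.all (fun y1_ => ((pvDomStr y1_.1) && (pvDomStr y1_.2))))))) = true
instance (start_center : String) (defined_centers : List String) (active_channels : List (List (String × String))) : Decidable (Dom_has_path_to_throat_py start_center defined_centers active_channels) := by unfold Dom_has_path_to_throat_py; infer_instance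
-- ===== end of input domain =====

-- B replaces the adjacency-dict + queue BFS by a bounded-round set saturation over the raw
-- channel list; objective: alternative (different algorithm, similar cost).

-- ch["k"] on a dict given as an association list: first match; Pre_ guarantees the key is
-- present, so the "" default is never used on admitted inputs.
def pvKey (ch : List (String × String)) (k : String) : String :=
  ((ch.find? (fun p => p.1 == k)).map Prod.snd).getD ""

-- ===== PORT A =====
-- _build_center_adjacency: defaultdict(set); adj[a].add(b); adj[b].add(a)
def buildAdjA (active_channels : List (List (String × String))) :
    PySem.Dict String (PySem.Set String) :=
  active_channels.foldl (fun adj ch =>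
    let a := pvKey ch "center_a"
    let b := pvKey ch "center_b"
    let adj := adj.insert a (PySem.Set.add (adj.getD a PySem.Set.empty) b)
    adj.insert b (PySem.Set.add (adj.getD b PySem.Set.empty) a)) PySem.Dict.empty

-- termination lemma for bfsLoopA (cited in its decreasing_by): marking a fresh node
-- strictly shrinks the unvisited part of univ
theorem pvFilterVisitLt (univ visited : List String) (current : String)
    (hcu : current ∈ univ) (hnv : ¬ visited.contains current = true) :
    (univ.filter fun x => !(current::visited).contains x).length <
      (univ.filter fun x => !visited.contains x).length := by
  have hsub : List.Sublist (univ.filter fun x => !(current::visited).contains x)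
      (univ.filter fun x => !visited.contains x) := by
    apply List.monotone_filter_right
    intro a ha
    simp only [List.contains_cons, Bool.not_eq_true', Bool.or_eq_false_iff] at ha ⊢
    exact ha.2
  rcases hsub.length_le.lt_or_eq with h | h
  · exact h
  · exfalso
    have heq := hsub.eq_of_length h
    have hmem : current ∈ univ.filter fun x => !visited.contains x := by
      simp only [List.mem_filter, List.contains_iff_mem] at hnv ⊢; exact ⟨hcu, by simpa using hnv⟩
    rw [← heq] at hmem
    simp [List.mem_filter] at hmem

-- the BFS while-loop of A.  The two proof arguments are TERMINATION INVARIANTS only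
-- (every queue element lies in univ = start :: defined_centers); the computation is the
-- literal Python loop: pop front, throat test, visited test, visit + enqueue filtered
-- neighbours.
def bfsLoopA (defined_centers : List String) (adj : PySem.Dict String (PySem.Set String))
    (univ : List String) (hdu : ∀ x ∈ defined_centers, x ∈ univ)
    (queue visited : List String) (hq : ∀ x ∈ queue, x ∈ univ) : Bool :=
  match h : queue with
  | [] => false
  | current :: rest =>
    if current == "throat" then true
    else if hvis : visited.contains current then
      bfsLoopA defined_centers adj univ hdu rest visited
        (fun x hx => hq x (h ▸ List.mem_cons_of_mem _ hx))
    else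
      let visited' := current :: visited
      let nbrs : PySem.Set String := (adj.get? current).getD PySem.Set.empty
      bfsLoopA defined_centers adj univ hdu
        (rest ++ nbrs.filter (fun nb => !visited'.contains nb && defined_centers.contains nb))
        visited'
        (by
          intro x hx
          rcases List.mem_append.1 hx with hx | hx
          · exact hq x (h ▸ List.mem_cons_of_mem _ hx)
          · have := List.of_mem_filter hx
            simp only [Bool.and_eq_true, List.contains_iff_mem] at this
            exact hdu x this.2)
  termination_by ((univ.filter (fun x => !visited.contains x)).length, queue.length)
  decreasing_by
    · exact Prod.Lex.right _ (by simp)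
    · exact Prod.Lex.left _ _
        (pvFilterVisitLt univ visited current (hq current (List.mem_cons_self ..)) hvis)

def has_path_to_throat_py (start_center : String) (defined_centers : List String) (active_channels : List (List (String × String))) : Bool :=
  if start_center == "throat" then true
  else if !defined_centers.contains start_center then false
  else
    bfsLoopA defined_centers (buildAdjA active_channels)
      (start_center :: defined_centers) (fun x hx => List.mem_cons_of_mem _ hx)
      [start_center] []
      (by intro x hx; simp only [List.mem_singleton] at hx; exact hx ▸ List.mem_cons_self ..)

-- ===== PORT B =====
-- one saturation round: scan the raw channel list, adding endpoints reachable in one step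
-- from the current set (membership is tested against the round's initial set `reach`)
def expandB (defined_centers : List String) (active_channels : List (List (String × String)))
    (reach : PySem.Set String) : PySem.Set String :=
  active_channels.foldl (fun acc ch =>
    let a := pvKey ch "center_a"
    let b := pvKey ch "center_b"
    let acc := if reach.contains a && defined_centers.contains b then PySem.Set.add acc b else acc
    if reach.contains b && defined_centers.contains a then PySem.Set.add acc a else acc)
    reach  -- new = set(reach): copying a set is the identity on the model

-- the `for _ in range(len(defined_centers))` loop, as n-fold application
def iterB (defined_centers : List String) (active_channels : List (List (String × String))) :
    Nat → PySem.Set String → PySem.Set String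
  | 0, s => s
  | n + 1, s => iterB defined_centers active_channels n (expandB defined_centers active_channels s)

def has_path_to_throat_py_alt (start_center : String) (defined_centers : List String) (active_channels : List (List (String × String))) : Bool :=
  if start_center == "throat" then true
  else if !defined_centers.contains start_center then false
  else
    (iterB defined_centers active_channels defined_centers.length
      (PySem.Set.add PySem.Set.empty start_center)).contains "throat"

-- ===== PRECONDITION & SPEC =====
-- Pre_ excludes exactly the inputs on which Python raises KeyError: past the two guards
-- (start ≠ "throat" and start defined), both A and B subscript every channel dict with
-- "center_a" and "center_b", so those keys must be present; under a guard the channels are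
-- never touched and nothing is required of them.
def Pre_has_path_to_throat_py (start_center : String) (defined_centers : List String) (active_channels : List (List (String × String))) : Prop :=
  (start_center ≠ "throat" ∧ start_center ∈ defined_centers) →
    ∀ ch ∈ active_channels,
      (ch.find? (fun p => p.1 == "center_a")).isSome ∧ (ch.find? (fun p => p.1 == "center_b")).isSome
instance (start_center : String) (defined_centers : List String) (active_channels : List (List (String × String))) : Decidable (Pre_has_path_to_throat_py start_center defined_centers active_channels) := by unfold Pre_has_path_to_throat_py; infer_instance

def pvWitness_has_path_to_throat_py : String × List String × (List (List (String × String))) :=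
  ("g", ["g", "throat"], [[("center_a", "g"), ("center_b", "throat")]])

def Spec_has_path_to_throat_py (start_center : String) (defined_centers : List String) (active_channels : List (List (String × String))) (out : Bool) : Prop := out = has_path_to_throat_py_alt start_center defined_centers active_channels
instance (start_center : String) (defined_centers : List String) (active_channels : List (List (String × String))) (out : Bool) : Decidable (Spec_has_path_to_throat_py start_center defined_centers active_channels out) := by unfold Spec_has_path_to_throat_py; infer_instance

-- ===== CLAIM (what is proved, stated in full; the proofs are below) =====
def Claim_equal_has_path_to_throat_py : Prop := ∀ (start_center : String) (defined_centers : List String) (active_channels : List (List (String × String))), Dom_has_path_to_throat_py start_center defined_centers active_channels → Pre_has_path_to_throat_py start_center defined_centers active_channels → Spec_has_path_to_throat_py start_center defined_centers active_channels (has_path_to_throat_py start_center defined_centers active_channels)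

-- ===== LEMMAS AND PROOFS =====

-- the step relation both programs explore: one active channel joins x to y, and y is defined
def EdgeP (active_channels : List (List (String × String))) (x y : String) : Prop :=
  ∃ ch ∈ active_channels,
    (pvKey ch "center_a" = x ∧ pvKey ch "center_b" = y) ∨
    (pvKey ch "center_b" = x ∧ pvKey ch "center_a" = y)

def StepP (defined_centers : List String) (active_channels : List (List (String × String)))
    (x y : String) : Prop :=
  y ∈ defined_centers ∧ EdgeP active_channels x y

theorem mem_adjStep (d : PySem.Dict String (PySem.Set String)) (a b x y : String) :
    y ∈ (((d.insert a (PySem.Set.add (d.getD a PySem.Set.empty) b)).insert b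
      (PySem.Set.add ((d.insert a (PySem.Set.add (d.getD a PySem.Set.empty) b)).getD b PySem.Set.empty) a)).get? x).getD PySem.Set.empty
    ↔ y ∈ (d.get? x).getD PySem.Set.empty ∨ ((a = x ∧ b = y) ∨ (b = x ∧ a = y)) := by
  by_cases hxb : x = b
  · subst hxb
    rw [PySem.Dict.get?_insert_self]
    by_cases hxa : x = a
    · subst hxa
      simp only [PySem.Dict.getD, PySem.Dict.get?_insert_self, Option.getD_some,
        PySem.Set.mem_add]
      constructor
      · rintro ((h | rfl) | rfl) <;> simp_all
      · rintro (h | ⟨h1, h2⟩ | ⟨h1, h2⟩) <;> simp_all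
    · rw [PySem.Dict.getD, PySem.Dict.get?_insert_of_ne d _ (fun h => hxa h)]
      simp only [Option.getD_some, PySem.Set.mem_add]
      constructor
      · rintro (h | rfl) <;> simp_all
      · rintro (h | ⟨h1, h2⟩ | ⟨h1, h2⟩) <;> simp_all
  · rw [PySem.Dict.get?_insert_of_ne _ _ (fun h => hxb h)]
    by_cases hxa : x = a
    · subst hxa
      rw [PySem.Dict.get?_insert_self]
      simp only [Option.getD_some, PySem.Set.mem_add, PySem.Dict.getD]
      constructor
      · rintro (h | rfl) <;> simp_all
      · rintro (h | ⟨h1, h2⟩ | ⟨h1, h2⟩) <;> simp_all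
    · rw [PySem.Dict.get?_insert_of_ne _ _ (fun h => hxa h)]
      constructor
      · exact fun h => Or.inl h
      · rintro (h | ⟨h1, h2⟩ | ⟨h1, h2⟩) <;> simp_all

theorem mem_adjFold (l : List (List (String × String))) (d : PySem.Dict String (PySem.Set String))
    (x y : String) :
    y ∈ ((l.foldl (fun adj ch =>
      let a := pvKey ch "center_a"
      let b := pvKey ch "center_b"
      let adj := adj.insert a (PySem.Set.add (adj.getD a PySem.Set.empty) b)
      adj.insert b (PySem.Set.add (adj.getD b PySem.Set.empty) a)) d).get? x).getD PySem.Set.empty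
    ↔ y ∈ (d.get? x).getD PySem.Set.empty ∨ EdgeP l x y := by
  induction l generalizing d with
  | nil => simp [EdgeP]
  | cons ch rest ih =>
    rw [List.foldl_cons, ih, mem_adjStep]
    simp only [EdgeP, List.mem_cons]
    constructor
    · rintro ((h | h) | h)
      · exact Or.inl h
      · exact Or.inr ⟨ch, Or.inl rfl, h⟩
      · rcases h with ⟨c, hc, hcc⟩; exact Or.inr ⟨c, Or.inr hc, hcc⟩
    · rintro (h | ⟨c, (rfl | hc), hcc⟩)
      · exact Or.inl (Or.inl h)
      · exact Or.inl (Or.inr hcc)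
      · exact Or.inr ⟨c, hc, hcc⟩

theorem mem_buildAdj (active_channels : List (List (String × String))) (x y : String) :
    y ∈ (((buildAdjA active_channels).get? x).getD PySem.Set.empty)
      ↔ EdgeP active_channels x y := by
  rw [buildAdjA, mem_adjFold]
  simp [PySem.Dict.get?, PySem.Dict.empty]

theorem mem_expandFold (defined_centers : List String) (reach : PySem.Set String)
    (l : List (List (String × String))) (acc : List String) (z : String) :
    z ∈ (l.foldl (fun acc ch =>
      let a := pvKey ch "center_a"
      let b := pvKey ch "center_b"
      let acc := if reach.contains a && defined_centers.contains b then PySem.Set.add acc b else acc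
      if reach.contains b && defined_centers.contains a then PySem.Set.add acc a else acc) acc)
    ↔ z ∈ acc ∨ ∃ ch ∈ l,
        (pvKey ch "center_a" ∈ reach ∧ pvKey ch "center_b" ∈ defined_centers ∧ z = pvKey ch "center_b") ∨
        (pvKey ch "center_b" ∈ reach ∧ pvKey ch "center_a" ∈ defined_centers ∧ z = pvKey ch "center_a") := by
  induction l generalizing acc with
  | nil => simp
  | cons ch rest ih =>
    rw [List.foldl_cons, ih]
    cases hb1 : (reach.contains (pvKey ch "center_a") && defined_centers.contains (pvKey ch "center_b")) <;>
    cases hb2 : (reach.contains (pvKey ch "center_b") && defined_centers.contains (pvKey ch "center_a")) <;>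
    simp only [hb1, hb2, Bool.false_eq_true, if_false, if_true, PySem.Set.mem_add, List.mem_cons] <;>
    simp only [Bool.and_eq_true, Bool.and_eq_false_iff,
      List.contains_iff_mem] at hb1 hb2 <;>
    aesop

theorem mem_expandB (defined_centers : List String) (active_channels : List (List (String × String)))
    (reach : PySem.Set String) (z : String) :
    z ∈ expandB defined_centers active_channels reach
      ↔ z ∈ reach ∨ ∃ y ∈ reach, StepP defined_centers active_channels y z := by
  rw [expandB, mem_expandFold]
  simp only [StepP, EdgeP]
  constructor
  · rintro (h | ⟨c, hc, ⟨h1, h2, rfl⟩ | ⟨h1, h2, rfl⟩⟩)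
    · exact Or.inl h
    · exact Or.inr ⟨_, h1, h2, ⟨c, hc, Or.inl ⟨rfl, rfl⟩⟩⟩
    · exact Or.inr ⟨_, h1, h2, ⟨c, hc, Or.inr ⟨rfl, rfl⟩⟩⟩
  · rintro (h | ⟨y, hy, hzd, ⟨c, hc, ⟨rfl, rfl⟩ | ⟨rfl, rfl⟩⟩⟩)
    · exact Or.inl h
    · exact Or.inr ⟨c, hc, Or.inl ⟨hy, hzd, rfl⟩⟩
    · exact Or.inr ⟨c, hc, Or.inr ⟨hy, hzd, rfl⟩⟩

theorem prefix_expandB (defined_centers : List String) (active_channels : List (List (String × String)))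
    (reach : PySem.Set String) (acc : List String) :
    acc <+: (active_channels.foldl (fun acc ch =>
      let a := pvKey ch "center_a"
      let b := pvKey ch "center_b"
      let acc := if reach.contains a && defined_centers.contains b then PySem.Set.add acc b else acc
      if reach.contains b && defined_centers.contains a then PySem.Set.add acc a else acc) acc) := by
  induction active_channels generalizing acc with
  | nil => simp
  | cons ch rest ih =>
    rw [List.foldl_cons]
    refine List.IsPrefix.trans ?_ (ih _)
    simp only [PySem.Set.add_eq_ite]
    split_ifs <;> simp [List.prefix_append]

theorem prefix_expandB' (defined_centers : List String) (active_channels : List (List (String × String)))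
    (reach : PySem.Set String) :
    reach <+: expandB defined_centers active_channels reach :=
  prefix_expandB defined_centers active_channels reach reach

theorem nodup_expandB (defined_centers : List String) (active_channels : List (List (String × String)))
    (reach : PySem.Set String) (acc : List String) (h : acc.Nodup) :
    (active_channels.foldl (fun acc ch =>
      let a := pvKey ch "center_a"
      let b := pvKey ch "center_b"
      let acc := if reach.contains a && defined_centers.contains b then PySem.Set.add acc b else acc
      if reach.contains b && defined_centers.contains a then PySem.Set.add acc a else acc) acc).Nodup := by
  induction active_channels generalizing acc with
  | nil => exact h
  | cons ch rest ih =>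
    rw [List.foldl_cons]
    apply ih
    dsimp only
    split_ifs <;> first
      | exact h
      | exact PySem.Set.nodup_add _ _ h
      | exact PySem.Set.nodup_add _ _ (PySem.Set.nodup_add _ _ h)

theorem iterB_succ' (defined_centers : List String) (active_channels : List (List (String × String)))
    (n : Nat) (s : PySem.Set String) :
    iterB defined_centers active_channels (n + 1) s
      = expandB defined_centers active_channels (iterB defined_centers active_channels n s) := by
  induction n generalizing s with
  | zero => rfl
  | succ n ih => rw [iterB, ih]; rfl

theorem prefix_iterB (defined_centers : List String) (active_channels : List (List (String × String)))
    (n : Nat) (s : PySem.Set String) :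
    s <+: iterB defined_centers active_channels n s := by
  induction n with
  | zero => exact List.prefix_refl s
  | succ n ih => rw [iterB_succ']; exact ih.trans (prefix_expandB' _ _ _)

theorem nodup_expandB' (defined_centers : List String) (active_channels : List (List (String × String)))
    (reach : PySem.Set String) (h : reach.Nodup) :
    (expandB defined_centers active_channels reach).Nodup :=
  nodup_expandB defined_centers active_channels reach reach h

theorem subset_expandB (defined_centers : List String) (active_channels : List (List (String × String)))
    (reach : PySem.Set String) (univ : List String)
    (hr : ∀ x ∈ reach, x ∈ univ) (hd : ∀ x ∈ defined_centers, x ∈ univ) :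
    ∀ x ∈ expandB defined_centers active_channels reach, x ∈ univ := by
  intro x hx
  rcases (mem_expandB _ _ _ _).1 hx with h | ⟨y, _, hstep⟩
  · exact hr x h
  · exact hd x hstep.1

theorem sound_expandB (defined_centers : List String) (active_channels : List (List (String × String)))
    (start : String) (reach : PySem.Set String)
    (hr : ∀ x ∈ reach, Relation.ReflTransGen (StepP defined_centers active_channels) start x) :
    ∀ z ∈ expandB defined_centers active_channels reach,
      Relation.ReflTransGen (StepP defined_centers active_channels) start z := by
  intro z hz
  rcases (mem_expandB _ _ _ _).1 hz with h | ⟨y, hy, hstep⟩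
  · exact hr z h
  · exact (hr y hy).tail hstep

theorem sound_iterB (defined_centers : List String) (active_channels : List (List (String × String)))
    (start : String) (n : Nat) (s : PySem.Set String)
    (hs : ∀ x ∈ s, Relation.ReflTransGen (StepP defined_centers active_channels) start x) :
    ∀ z ∈ iterB defined_centers active_channels n s,
      Relation.ReflTransGen (StepP defined_centers active_channels) start z := by
  induction n generalizing s with
  | zero => exact hs
  | succ n ih => exact fun z hz => ih _ (sound_expandB _ _ _ _ hs) z (by rwa [iterB] at hz)

theorem subset_iterB (defined_centers : List String) (active_channels : List (List (String × String)))
    (n : Nat) (s : PySem.Set String) (univ : List String)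
    (hs : ∀ x ∈ s, x ∈ univ) (hd : ∀ x ∈ defined_centers, x ∈ univ) :
    ∀ x ∈ iterB defined_centers active_channels n s, x ∈ univ := by
  induction n generalizing s with
  | zero => exact hs
  | succ n ih => exact fun x hx => ih _ (subset_expandB _ _ _ _ hs hd) x (by rwa [iterB] at hx)

theorem nodup_iterB (defined_centers : List String) (active_channels : List (List (String × String)))
    (n : Nat) (s : PySem.Set String) (hs : s.Nodup) :
    (iterB defined_centers active_channels n s).Nodup := by
  induction n generalizing s with
  | zero => exact hs
  | succ n ih => rw [iterB]; exact ih _ (nodup_expandB' _ _ _ hs)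

-- once a round adds nothing, every later round adds nothing
theorem iterB_of_fixed (defined_centers : List String) (active_channels : List (List (String × String)))
    (s : PySem.Set String) (hfix : expandB defined_centers active_channels s = s) (n : Nat) :
    iterB defined_centers active_channels n s = s := by
  induction n with
  | zero => rfl
  | succ n ih => rw [iterB, hfix, ih]

theorem length_lt_of_not_fixed (defined_centers : List String)
    (active_channels : List (List (String × String))) (s : PySem.Set String)
    (h : expandB defined_centers active_channels s ≠ s) :
    s.length < (expandB defined_centers active_channels s).length := by
  rcases (prefix_expandB' defined_centers active_channels s).length_le.lt_or_eq with hl | hl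
  · exact hl
  · exact absurd ((prefix_expandB' defined_centers active_channels s).eq_of_length hl).symm h

-- a Nodup list inside univ is no longer than univ
theorem length_le_of_nodup_subset (l univ : List String) (hn : l.Nodup) (hs : ∀ x ∈ l, x ∈ univ) :
    l.length ≤ univ.length := by
  have h1 : l.toFinset.card = l.length := List.toFinset_card_of_nodup hn
  have h2 : l.toFinset ⊆ univ.toFinset := by
    intro x hx; simp only [List.mem_toFinset] at hx ⊢; exact hs x hx
  calc l.length = l.toFinset.card := h1.symm
    _ ≤ univ.toFinset.card := Finset.card_le_card h2
    _ ≤ univ.length := univ.toFinset_card_le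

theorem iterB_add (defined_centers : List String) (active_channels : List (List (String × String)))
    (a b : Nat) (s : PySem.Set String) :
    iterB defined_centers active_channels (a + b) s
      = iterB defined_centers active_channels a (iterB defined_centers active_channels b s) := by
  induction b generalizing s with
  | zero => rfl
  | succ b ih => rw [iterB, ← Nat.add_assoc, iterB, ih]

-- after len(defined_centers) rounds the reachable set is a fixed point of one round
theorem fixedB (defined_centers : List String) (active_channels : List (List (String × String)))
    (start : String) :
    expandB defined_centers active_channels
        (iterB defined_centers active_channels defined_centers.length [start])
      = iterB defined_centers active_channels defined_centers.length [start] := by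
  set N := defined_centers.length with hN
  have hex : ∃ n, n ≤ N ∧ expandB defined_centers active_channels
      (iterB defined_centers active_channels n [start])
      = iterB defined_centers active_channels n [start] := by
    by_contra hno
    have hno : ∀ n, n ≤ N → expandB defined_centers active_channels
        (iterB defined_centers active_channels n [start])
        ≠ iterB defined_centers active_channels n [start] :=
      fun n hn h => hno ⟨n, hn, h⟩
    have grow : ∀ n, n ≤ N + 1 → n + 1 ≤ (iterB defined_centers active_channels n [start]).length := by
      intro n hn
      induction n with
      | zero => simp [iterB]
      | succ n ih =>
        have h1 := ih (Nat.le_of_succ_le hn)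
        have h2 := hno n (Nat.lt_succ_iff.mp (Nat.lt_of_succ_le hn))
        have h3 := length_lt_of_not_fixed defined_centers active_channels
          (iterB defined_centers active_channels n [start]) h2
        rw [iterB_succ']
        omega
    have hbound : (iterB defined_centers active_channels (N + 1) [start]).length
        ≤ (start :: defined_centers).length := by
      apply length_le_of_nodup_subset
      · exact nodup_iterB _ _ _ _ (List.nodup_singleton start)
      · apply subset_iterB
        · intro x hx; simp only [List.mem_singleton] at hx; exact hx ▸ List.mem_cons_self ..
        · exact fun x hx => List.mem_cons_of_mem _ hx
    have := grow (N + 1) (Nat.le_refl _)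
    simp only [List.length_cons, ← hN] at hbound
    omega
  rcases hex with ⟨n, hn, hfix⟩
  have : iterB defined_centers active_channels N [start]
      = iterB defined_centers active_channels n [start] := by
    have : N = (N - n) + n := by omega
    rw [this, iterB_add, iterB_of_fixed _ _ _ hfix]
  rw [this, hfix]

-- B's final set is exactly the set of nodes reachable from start
theorem mem_finalB (defined_centers : List String) (active_channels : List (List (String × String)))
    (start z : String) :
    z ∈ iterB defined_centers active_channels defined_centers.length [start]
      ↔ Relation.ReflTransGen (StepP defined_centers active_channels) start z := by
  constructor
  · apply sound_iterB
    intro x hx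
    simp only [List.mem_singleton] at hx
    exact hx ▸ Relation.ReflTransGen.refl
  · intro h
    induction h with
    | refl =>
      exact (prefix_iterB defined_centers active_channels _ [start]).subset (List.mem_singleton_self start)
    | tail hab hbc ih =>
      have := (mem_expandB defined_centers active_channels _ _).2 (Or.inr ⟨_, ih, hbc⟩)
      rwa [fixedB] at this

theorem bfsA_sound (defined_centers : List String) (active_channels : List (List (String × String)))
    (univ : List String) (hdu : ∀ x ∈ defined_centers, x ∈ univ) (start : String)
    (queue visited : List String) (hq : ∀ x ∈ queue, x ∈ univ)
    (hreach : ∀ s ∈ queue, Relation.ReflTransGen (StepP defined_centers active_channels) start s)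
    (htrue : bfsLoopA defined_centers (buildAdjA active_channels) univ hdu queue visited hq = true) :
    Relation.ReflTransGen (StepP defined_centers active_channels) start "throat" := by
  revert hreach htrue
  fun_induction bfsLoopA defined_centers (buildAdjA active_channels) univ hdu queue visited hq with
  | case1 visited hq' h' =>
    intro _ htrue
    simp at htrue
  | case2 visited current rest hq' heq h' =>
    intro hreach _
    have := hreach current (List.mem_cons_self ..)
    rwa [(by simpa using heq : current = "throat")] at this
  | case3 visited current rest hq' hne hvis h' ih =>
    intro hreach htrue
    exact ih (fun s hs => hreach s (List.mem_cons_of_mem _ hs)) htrue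
  | case4 visited current rest hq' hne hnvis visited' nbrs h' ih =>
    intro hreach htrue
    apply ih _ htrue
    intro s hs
    rcases List.mem_append.1 hs with hs | hs
    · exact hreach s (List.mem_cons_of_mem _ hs)
    · have hmem := List.mem_of_mem_filter hs
      have hcond := List.of_mem_filter hs
      simp only [Bool.and_eq_true, Bool.not_eq_true', List.contains_iff_mem] at hcond
      have hedge : EdgeP active_channels current s := by
        rw [← mem_buildAdj]
        simpa [PySem.Dict.getD] using hmem
      exact (hreach current (List.mem_cons_self ..)).tail ⟨by simpa using hcond.2, hedge⟩

-- if every visited node's successors are visited or queued, the visited set is closed when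
-- the queue is empty; a false BFS answer therefore refutes reachability
theorem bfsA_complete (defined_centers : List String) (active_channels : List (List (String × String)))
    (univ : List String) (hdu : ∀ x ∈ defined_centers, x ∈ univ)
    (queue visited : List String) (hq : ∀ x ∈ queue, x ∈ univ)
    (hclosed : ∀ x ∈ visited, ∀ y, StepP defined_centers active_channels x y → y ∈ visited ∨ y ∈ queue)
    (hthr : "throat" ∉ visited)
    (hfalse : bfsLoopA defined_centers (buildAdjA active_channels) univ hdu queue visited hq = false) :
    ∀ x, (x ∈ visited ∨ x ∈ queue) →
      ¬ Relation.ReflTransGen (StepP defined_centers active_channels) x "throat" := by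
  revert hclosed hthr hfalse
  fun_induction bfsLoopA defined_centers (buildAdjA active_channels) univ hdu queue visited hq with
  | case1 visited hq' h' =>
    intro hclosed hthr _ x hx hrtg
    rcases hx with hx | hx
    · have hzin : ∀ a b, Relation.ReflTransGen (StepP defined_centers active_channels) a b →
          a ∈ visited → b ∈ visited := by
        intro a b hab
        induction hab using Relation.ReflTransGen.head_induction_on with
        | refl => exact id
        | head hstep _ ih =>
          intro ha
          rcases hclosed _ ha _ hstep with h | h
          · exact ih h
          · exact absurd h (List.not_mem_nil)
      exact hthr (hzin _ _ hrtg hx)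
    · exact absurd hx (List.not_mem_nil)
  | case2 visited current rest hq' heq h' =>
    intro _ _ hfalse
    simp at hfalse
  | case3 visited current rest hq' hne hvis h' ih =>
    intro hclosed hthr hfalse x hx
    have hvism : current ∈ visited := by simpa [List.contains_iff_mem] using hvis
    apply ih ?_ hthr hfalse x
    · rcases hx with hx | hx
      · exact Or.inl hx
      · rcases List.mem_cons.1 hx with rfl | hx
        · exact Or.inl hvism
        · exact Or.inr hx
    · intro a ha y hy
      rcases hclosed a ha y hy with h | h
      · exact Or.inl h
      · rcases List.mem_cons.1 h with rfl | h
        · exact Or.inl hvism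
        · exact Or.inr h
  | case4 visited current rest hq' hne hnvis visited' nbrs h' ih =>
    intro hclosed hthr hfalse x hx
    have hnem : current ≠ "throat" := by simpa using hne
    apply ih ?_ ?_ hfalse x
    · rcases hx with hx | hx
      · exact Or.inl (List.mem_cons_of_mem _ hx)
      · rcases List.mem_cons.1 hx with rfl | hx
        · exact Or.inl (List.mem_cons_self ..)
        · exact Or.inr (List.mem_append.2 (Or.inl hx))
    · intro a ha y hy
      rcases List.mem_cons.1 ha with rfl | ha
      · -- a = current: y is a neighbour of current
        have hynbr : y ∈ nbrs := by
          have := (mem_buildAdj active_channels a y).2 hy.2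
          simpa [nbrs, PySem.Dict.getD] using this
        by_cases hyv : y ∈ visited'
        · exact Or.inl hyv
        · refine Or.inr (List.mem_append.2 (Or.inr ?_))
          refine List.mem_filter.2 ⟨hynbr, ?_⟩
          simp only [Bool.and_eq_true, Bool.not_eq_true', List.contains_iff_mem]
          constructor
          · simpa [List.contains_iff_mem] using hyv
          · simpa [List.contains_iff_mem] using hy.1
      · rcases hclosed a ha y hy with h | h
        · exact Or.inl (List.mem_cons_of_mem _ h)
        · rcases List.mem_cons.1 h with rfl | h
          · exact Or.inl (List.mem_cons_self ..)
          · exact Or.inr (List.mem_append.2 (Or.inl h))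
    · simp only [visited', List.mem_cons, not_or]
      exact ⟨fun h => hnem h.symm, hthr⟩

theorem main_eq (start_center : String) (defined_centers : List String)
    (active_channels : List (List (String × String))) :
    has_path_to_throat_py start_center defined_centers active_channels
      = has_path_to_throat_py_alt start_center defined_centers active_channels := by
  unfold has_path_to_throat_py has_path_to_throat_py_alt
  split_ifs with h1 h2
  · rfl
  · rfl
  · rw [Bool.eq_iff_iff]
    constructor
    · intro htrue
      have hr := bfsA_sound defined_centers active_channels
        (start_center :: defined_centers) (fun x hx => List.mem_cons_of_mem _ hx) start_center
        [start_center] [] _ (fun s hs => by simpa using (by simpa using hs : s = start_center) ▸ Relation.ReflTransGen.refl) htrue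
      have hs0 : (PySem.Set.empty.add start_center : PySem.Set String) = [start_center] := rfl
      rw [hs0, show ∀ s : PySem.Set String, s.contains "throat" = true ↔ "throat" ∈ s from
        fun s => by simp [PySem.Set.contains], mem_finalB]
      exact hr
    · intro hB
      have hr : Relation.ReflTransGen (StepP defined_centers active_channels) start_center "throat" := by
        have hs0 : (PySem.Set.empty.add start_center : PySem.Set String) = [start_center] := rfl
        rw [hs0, show ∀ s : PySem.Set String, s.contains "throat" = true ↔ "throat" ∈ s from
          fun s => by simp [PySem.Set.contains], mem_finalB] at hB
        exact hB
      by_contra hfalse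
      have hf : bfsLoopA defined_centers (buildAdjA active_channels)
          (start_center :: defined_centers) (fun x hx => List.mem_cons_of_mem _ hx)
          [start_center] []
          (by intro x hx; simp only [List.mem_singleton] at hx; exact hx ▸ List.mem_cons_self ..) = false := by
        simpa using hfalse
      exact bfsA_complete defined_centers active_channels _ _ _ _ _
        (fun x hx => absurd hx (List.not_mem_nil))
        (List.not_mem_nil)
        hf start_center (Or.inr (List.mem_singleton_self _)) hr


-- ===== VERDICT (by name: the statement is the Claim_ definition above) =====
theorem has_path_to_throat_py_spec : Claim_equal_has_path_to_throat_py := by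
  intro start_center defined_centers active_channels _ _
  unfold Spec_has_path_to_throat_py
  exact main_eq start_center defined_centers active_channels
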